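-- pv_equiv track=rewrite | github.com/Airyshtoteles/learnLeetCode | Day20/Part5/max_deletions_string.py | maximumDeletions
-- ===== SOURCE A (Python) =====
-- def z_function(t: str):
--     n = len(t)
--     z = [0]*n
--     l = r = 0
--     for i in range(1, n):
--         if i <= r:
--             z[i] = min(r - i + 1, z[i - l])
--         while i + z[i] < n and t[z[i]] == t[i + z[i]]:
--             z[i] += 1
--         if i + z[i] - 1 > r:
--             l, r = i, i + z[i] - 1
--     z[0] = n
--     return z
--
-- def maximumDeletions(s: str) -> int:
--     n = len(s)
--     dp = [0]*(n+1)  # dp[i]: max deletions starting at i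
--     for i in range(n-1, -1, -1):
--         best = 1  # can always take s[i:] as one piece if no further deletion possible
--         t = s[i:]
--         z = z_function(t)
--         lim = (n - i)//2
--         for k in range(1, lim+1):
--             if z[k] >= k:
--                 best = max(best, 1 + dp[i + k])
--         dp[i] = best
--     return dp[0]
-- ===== SOURCE B (Python) =====
-- def maximumDeletions(s: str) -> int:
--     n = len(s)
--     nxt = [0] * (n + 1)  # lcp row for suffix i+1: nxt[j] = LCP(s[i+1:], s[j:])
--     dp = [0] * (n + 1)
--     for i in range(n - 1, -1, -1):
--         ci = s[i]
--         row = [nxt[j + 1] + 1 if ci == s[j] else 0 for j in range(n)] + [0]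
--         best = 1
--         for k in range(1, (n - i) // 2 + 1):
--             if row[i + k] >= k:
--                 best = max(best, 1 + dp[i + k])
--         dp[i] = best
--         nxt = row
--     return dp[0]
-- ===== Notes on version B (the rewrite author's own statement) =====
-- stated objective: faster
-- what changed: Replaces the per-suffix z-function scans (with their l/r-window bookkeeping and a fresh z array per suffix) by one incrementally maintained LCP-table row (lcp[i][j] = lcp[i+1][j+1]+1 when s[i]==s[j]) consumed by the same backward DP.
import Mathlib
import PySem

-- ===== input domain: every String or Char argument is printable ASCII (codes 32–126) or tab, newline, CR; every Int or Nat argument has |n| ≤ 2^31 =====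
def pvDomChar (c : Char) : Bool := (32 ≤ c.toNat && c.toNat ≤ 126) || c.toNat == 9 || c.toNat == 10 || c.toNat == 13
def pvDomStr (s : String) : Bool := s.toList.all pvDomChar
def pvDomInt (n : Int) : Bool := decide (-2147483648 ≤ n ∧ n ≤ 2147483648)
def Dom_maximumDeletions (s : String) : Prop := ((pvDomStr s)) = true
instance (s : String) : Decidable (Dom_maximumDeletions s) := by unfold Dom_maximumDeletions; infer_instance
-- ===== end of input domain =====

-- B replaces A's per-suffix z-function scans with an incrementally maintained LCP-table row
-- (lcp[i][j] = lcp[i+1][j+1]+1 when s[i]==s[j]) consumed by the same backward DP (measured constant-factor speedup).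

-- ===== PORT A =====
-- the z-function's inner while loop: extend match length v of t[0:] vs t[i:]
def zext (t : List Char) (i : Nat) (v : Nat) : Nat :=
  if h : i + v < t.length ∧ t.getD v ' ' = t.getD (i + v) ' ' then
    zext t i (v + 1)
  else v
termination_by t.length - (i + v)
decreasing_by omega

-- one iteration of the z-function's for loop, state (z, l, r)
def zstep (t : List Char) (st : List Nat × Nat × Nat) (i : Nat) : List Nat × Nat × Nat :=
  let z := st.1
  let l := st.2.1
  let r := st.2.2
  let v0 := if i ≤ r then min (r - i + 1) (z.getD (i - l) 0) else 0
  let zi := zext t i v0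
  let z' := z.set i zi
  if r < i + zi - 1 then (z', i, i + zi - 1) else (z', l, r)

def z_function (t : List Char) : List Nat :=
  let n := t.length
  let res := (List.range' 1 (n - 1)).foldl (zstep t) (List.replicate n 0, 0, 0)
  res.1.set 0 n

-- one iteration of A's dp loop (i from n-1 down to 0)
def mdStepA (s : List Char) (dp : List Nat) (i : Nat) : List Nat :=
  let n := s.length
  let t := s.drop i
  let z := z_function t
  let lim := (n - i) / 2
  let best := (List.range' 1 lim).foldl
    (fun best k => if k ≤ z.getD k 0 then max best (1 + dp.getD (i + k) 0) else best) 1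
  dp.set i best

def maximumDeletions (s : String) : Int :=
  let cs := s.toList
  let n := cs.length
  let dp := ((List.range n).reverse).foldl (mdStepA cs) (List.replicate (n + 1) 0)
  (dp.getD 0 0 : Nat)

-- ===== PORT B =====
-- one iteration of B's fused loop: build lcp row i from row i+1, then dp[i]; state (nxt, dp)
def mdStepB (s : List Char) (st : List Nat × List Nat) (i : Nat) : List Nat × List Nat :=
  let n := s.length
  let nxt := st.1
  let dp := st.2
  let ci := s.getD i ' '
  let row := ((List.range n).map
      (fun j => if ci = s.getD j ' ' then nxt.getD (j + 1) 0 + 1 else 0)) ++ [0]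
  let best := (List.range' 1 ((n - i) / 2)).foldl
    (fun best k => if k ≤ row.getD (i + k) 0 then max best (1 + dp.getD (i + k) 0) else best) 1
  (row, dp.set i best)

def maximumDeletions_alt (s : String) : Int :=
  let cs := s.toList
  let n := cs.length
  let res := ((List.range n).reverse).foldl (mdStepB cs)
      (List.replicate (n + 1) 0, List.replicate (n + 1) 0)
  (res.2.getD 0 0 : Nat)

-- ===== PRECONDITION & SPEC =====
def Spec_maximumDeletions (s : String) (out : Int) : Prop := out = maximumDeletions_alt s
instance (s : String) (out : Int) : Decidable (Spec_maximumDeletions s out) := by unfold Spec_maximumDeletions; infer_instance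

-- ===== CLAIM (what is proved, stated in full; the proofs are below) =====
def Claim_equal_maximumDeletions : Prop := ∀ (s : String), Dom_maximumDeletions s → Spec_maximumDeletions s (maximumDeletions s)

-- ===== LEMMAS AND PROOFS =====

-- longest common prefix length of two characters lists (the shared specification)
def lcpS : List Char → List Char → Nat
  | a :: as, b :: bs => if a = b then lcpS as bs + 1 else 0
  | _, _ => 0

theorem lcpS_nil_right (t : List Char) : lcpS t [] = 0 := by cases t <;> rfl

theorem lcpS_le_right : ∀ (t u : List Char), lcpS t u ≤ u.length := by
  intro t
  induction t with
  | nil => intro u; cases u <;> simp [lcpS]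
  | cons a as ih =>
    intro u; cases u with
    | nil => simp [lcpS_nil_right]
    | cons b bs =>
      simp only [lcpS, List.length_cons]
      split
      · have := ih bs; omega
      · omega

theorem lcpS_getD : ∀ (t u : List Char) (d : Nat), d < lcpS t u →
    t.getD d ' ' = u.getD d ' ' := by
  intro t
  induction t with
  | nil => intro u d h; cases u <;> simp [lcpS] at h
  | cons a as ih =>
    intro u d h
    cases u with
    | nil => simp [lcpS_nil_right] at h
    | cons b bs =>
      simp only [lcpS] at h
      split at h
      · cases d with
        | zero => simp_all
        | succ d' => simpa using ih bs d' (by omega)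
      · omega

theorem lcpS_ge (t u : List Char) (v : Nat) (hv1 : v ≤ t.length) (hv2 : v ≤ u.length)
    (hd : ∀ d, d < v → t.getD d ' ' = u.getD d ' ') : v ≤ lcpS t u := by
  induction t generalizing u v with
  | nil => simp at hv1; omega
  | cons a as ih =>
    cases u with
    | nil => simp at hv2; omega
    | cons b bs =>
      cases v with
      | zero => omega
      | succ v' =>
        have hab : a = b := by simpa using hd 0 (by omega)
        simp only [lcpS, if_pos hab]
        have := ih bs v' (by simpa using hv1) (by simpa using hv2)
          (fun d hdv => by simpa using hd (d + 1) (by omega))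
        omega

theorem lcpS_max (t u : List Char) (h1 : lcpS t u < t.length) (h2 : lcpS t u < u.length) :
    t.getD (lcpS t u) ' ' ≠ u.getD (lcpS t u) ' ' := by
  induction t generalizing u with
  | nil => simp at h1
  | cons a as ih =>
    cases u with
    | nil => simp at h2
    | cons b bs =>
      by_cases hab : a = b
      · simp only [lcpS, if_pos hab] at *
        simpa using ih bs (by simpa using h1) (by simpa using h2)
      · simp only [lcpS, if_neg hab]
        simpa using hab

theorem lcpS_nil_left (u : List Char) : lcpS [] u = 0 := by cases u <;> rfl

theorem getD_repl (n j : Nat) : (List.replicate n (0 : Nat)).getD j 0 = 0 := by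
  by_cases h : j < n
  · simp [List.getD, h]
  · simp [List.getD, List.getElem?_replicate]
    split <;> simp_all

theorem getD_drop (t : List Char) (i d : Nat) :
    (t.drop i).getD d ' ' = t.getD (i + d) ' ' := by
  simp [List.getD, List.getElem?_drop]

-- the while loop halts exactly at the lcp
theorem zext_stop (t : List Char) (i : Nat) (hi : 1 ≤ i) :
    zext t i (lcpS t (t.drop i)) = lcpS t (t.drop i) := by
  rw [zext, dif_neg]
  rintro ⟨h1, h2⟩
  have hub : lcpS t (t.drop i) ≤ (t.drop i).length := lcpS_le_right t (t.drop i)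
  have hdl : (t.drop i).length = t.length - i := by simp
  refine lcpS_max t (t.drop i) (by omega) (by omega) ?_
  rw [getD_drop]
  exact h2

-- zext computes the lcp once started at any value below it
theorem zext_eq (t : List Char) (i : Nat) (hi : 1 ≤ i) :
    ∀ v, v ≤ lcpS t (t.drop i) → zext t i v = lcpS t (t.drop i) := by
  have hub : lcpS t (t.drop i) ≤ (t.drop i).length := lcpS_le_right t (t.drop i)
  have hdl : (t.drop i).length = t.length - i := by simp
  suffices h : ∀ m v, lcpS t (t.drop i) - v ≤ m → v ≤ lcpS t (t.drop i) →
      zext t i v = lcpS t (t.drop i) from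
    fun v hv => h (lcpS t (t.drop i)) v (by omega) hv
  intro m
  induction m with
  | zero =>
    intro v h0 hv
    have : v = lcpS t (t.drop i) := by omega
    subst this
    exact zext_stop t i hi
  | succ m ih =>
    intro v h0 hv
    rcases Nat.lt_or_ge v (lcpS t (t.drop i)) with hlt | hge
    · rw [zext, dif_pos]
      · exact ih (v + 1) (by omega) (by omega)
      · constructor
        · omega
        · have := lcpS_getD t (t.drop i) v hlt
          rw [getD_drop] at this
          exact this
    · have : v = lcpS t (t.drop i) := by omega
      subst this
      exact zext_stop t i hi

-- invariant of the z-function's main loop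
def ZInv (t : List Char) (i : Nat) (st : List Nat × Nat × Nat) : Prop :=
  st.1.length = t.length ∧
  (∀ j, 1 ≤ j → j < i → st.1.getD j 0 = lcpS t (t.drop j)) ∧
  st.2.1 < i ∧
  st.2.2 + 1 ≤ st.2.1 + lcpS t (t.drop st.2.1) ∧
  (st.2.1 = 0 → st.2.2 = 0)

theorem zstep_inv (t : List Char) (i : Nat) (st : List Nat × Nat × Nat)
    (h : ZInv t i st) (hi : 1 ≤ i) (hin : i < t.length) :
    ZInv t (i + 1) (zstep t st i) := by
  obtain ⟨z, l, r⟩ := st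
  obtain ⟨hlen, hz, hl, hbox, hl0⟩ := h
  simp only at hlen hz hl hbox hl0
  have hLub : lcpS t (t.drop i) ≤ (t.drop i).length := lcpS_le_right t (t.drop i)
  have hdli : (t.drop i).length = t.length - i := by simp
  have hlub : lcpS t (t.drop l) ≤ (t.drop l).length := lcpS_le_right t (t.drop l)
  have hdll : (t.drop l).length = t.length - l := by simp
  have hrlt : r < t.length := by omega
  have hv0 : (if i ≤ r then min (r - i + 1) (z.getD (i - l) 0) else 0) ≤ lcpS t (t.drop i) := by
    split
    · rename_i hir
      have hlpos : 1 ≤ l := by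
        rcases Nat.eq_zero_or_pos l with h0 | h1
        · have := hl0 h0; omega
        · exact h1
      have hzval : z.getD (i - l) 0 = lcpS t (t.drop (i - l)) := hz _ (by omega) (by omega)
      have hmin : min (r - i + 1) (z.getD (i - l) 0) ≤ r - i + 1 := min_le_left _ _
      have hmin2 : min (r - i + 1) (z.getD (i - l) 0) ≤ z.getD (i - l) 0 := min_le_right _ _
      refine lcpS_ge t (t.drop i) _ (by omega) (by omega) ?_
      intro d hd
      rw [getD_drop]
      have hd1 : d < lcpS t (t.drop (i - l)) := by rw [← hzval]; omega
      have hm : i - l + d < lcpS t (t.drop l) := by omega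
      have hbox' := lcpS_getD t (t.drop l) (i - l + d) hm
      rw [getD_drop] at hbox'
      have hidx : l + (i - l + d) = i + d := by omega
      rw [hidx] at hbox'
      have hzd := lcpS_getD t (t.drop (i - l)) d hd1
      rw [getD_drop] at hzd
      exact hzd.trans hbox'
    · exact Nat.zero_le _
  have hzi := zext_eq t i hi _ hv0
  show ZInv t (i + 1)
    (if r < i + zext t i (if i ≤ r then min (r - i + 1) (z.getD (i - l) 0) else 0) - 1 then
      (z.set i (zext t i (if i ≤ r then min (r - i + 1) (z.getD (i - l) 0) else 0)), i,
        i + zext t i (if i ≤ r then min (r - i + 1) (z.getD (i - l) 0) else 0) - 1)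
     else (z.set i (zext t i (if i ≤ r then min (r - i + 1) (z.getD (i - l) 0) else 0)), l, r))
  rw [hzi]
  have hset : ∀ j, 1 ≤ j → j < i + 1 →
      (z.set i (lcpS t (t.drop i))).getD j 0 = lcpS t (t.drop j) := by
    intro j hj1 hj2
    rcases Nat.lt_or_ge j i with hji | hji
    · simp only [List.getD, List.getElem?_set_ne (by omega : i ≠ j)]
      exact hz j hj1 hji
    · have hji' : j = i := by omega
      subst hji'
      simp only [List.getD, List.getElem?_set_self (by omega : j < z.length),
        Option.getD_some]
  split
  · rename_i hbr
    refine ⟨by simp [hlen], hset, ?_, ?_, ?_⟩ <;> simp only <;> omega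
  · rename_i hbr
    refine ⟨by simp [hlen], hset, ?_, ?_, ?_⟩ <;> simp only
    · omega
    · exact hbox
    · exact hl0

theorem zloop_inv (t : List Char) (ht : 1 ≤ t.length) :
    ∀ m, m ≤ t.length - 1 →
      ZInv t (1 + m) ((List.range' 1 m).foldl (zstep t) (List.replicate t.length 0, 0, 0)) := by
  intro m
  induction m with
  | zero =>
    intro _
    simp only [List.range'_zero, List.foldl_nil]
    refine ⟨by simp, ?_, show (0 : Nat) < 1 + 0 by omega, ?_, fun _ => rfl⟩
    · intro j hj1 hj2; omega
    · show (0 : Nat) + 1 ≤ 0 + lcpS t (t.drop 0)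
      simp only [List.drop_zero]
      have h1 : 1 ≤ lcpS t t := by
        refine lcpS_ge t t 1 ht ht ?_
        intro d _; rfl
      omega
  | succ m ih =>
    intro hm
    have hstep : List.range' 1 (m + 1) = List.range' 1 m ++ [1 + m] := by
      have := List.range'_concat (step := 1) (s := 1) (n := m)
      simpa using this
    rw [hstep, List.foldl_append, List.foldl_cons, List.foldl_nil]
    have := zstep_inv t (1 + m) _ (ih (by omega)) (by omega) (by omega)
    have harr : 1 + m + 1 = 1 + (m + 1) := by omega
    rw [harr] at this
    exact this

theorem z_function_getD (t : List Char) (k : Nat) (hk1 : 1 ≤ k) (hk : k < t.length) :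
    (z_function t).getD k 0 = lcpS t (t.drop k) := by
  have ht : 1 ≤ t.length := by omega
  have hinv := zloop_inv t ht (t.length - 1) le_rfl
  obtain ⟨hlen, hz, -, -, -⟩ := hinv
  have := hz k hk1 (by omega)
  unfold z_function
  simp only [List.getD, List.getElem?_set_ne (by omega : (0 : Nat) ≠ k)]
  exact this

-- the common dp recurrence, by well-founded recursion downward
def dpSpec (s : List Char) (i : Nat) : Nat :=
  if _h : i < s.length then
    (List.range' 1 ((s.length - i) / 2)).attach.foldl
      (fun best kk =>
        match kk with
        | ⟨k, hk⟩ =>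
          if k ≤ lcpS (s.drop i) (s.drop (i + k)) then
            max best (1 + dpSpec s (i + k))
          else best) 1
  else 0
termination_by s.length - i
decreasing_by
  have := List.mem_range'_1.mp hk
  omega

-- dpSpec's attach-fold equals the plain fold over the same range
theorem dpSpec_eq_fold (s : List Char) (i : Nat) (hi : i < s.length) :
    dpSpec s i = (List.range' 1 ((s.length - i) / 2)).foldl
      (fun best k => if k ≤ lcpS (s.drop i) (s.drop (i + k)) then
        max best (1 + dpSpec s (i + k)) else best) 1 := by
  rw [dpSpec, dif_pos hi]
  have hfun : (fun (best : Nat) (kk : {x // x ∈ List.range' 1 ((s.length - i) / 2)}) =>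
      match kk with
      | ⟨k, _⟩ => if k ≤ lcpS (s.drop i) (s.drop (i + k)) then
          max best (1 + dpSpec s (i + k)) else best)
      = (fun (best : Nat) (kk : {x // x ∈ List.range' 1 ((s.length - i) / 2)}) =>
        if kk.1 ≤ lcpS (s.drop i) (s.drop (i + kk.1)) then
          max best (1 + dpSpec s (i + kk.1)) else best) := by
    funext best kk
    rcases kk with ⟨k, hk⟩
    rfl
  rw [hfun]
  exact List.foldl_attach (l := List.range' 1 ((s.length - i) / 2))
    (f := fun best k => if k ≤ lcpS (s.drop i) (s.drop (i + k)) then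
      max best (1 + dpSpec s (i + k)) else best) (b := 1)

-- one dp step of A computes dpSpec at i and preserves higher entries
theorem mdStepA_spec (s : List Char) (dp : List Nat) (i : Nat) (hi : i < s.length)
    (hlen : dp.length = s.length + 1)
    (hdp : ∀ j, i + 1 ≤ j → dp.getD j 0 = dpSpec s j) :
    ∀ j, i ≤ j → (mdStepA s dp i).getD j 0 = dpSpec s j := by
  intro j hj
  unfold mdStepA
  rcases Nat.lt_or_ge i j with hji | hji
  · simp only [List.getD, List.getElem?_set_ne (by omega : i ≠ j)]
    exact hdp j hji
  · have hje : j = i := by omega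
    subst hje
    simp only [List.getD, List.getElem?_set_self (by omega : j < dp.length),
      Option.getD_some]
    rw [dpSpec_eq_fold s j hi]
    apply PySem.List.foldl_congr_mem
    intro best k hk
    obtain ⟨hk1, hk2⟩ := List.mem_range'_1.mp hk
    have hkn : k < (s.drop j).length := by simp; omega
    have hzk := z_function_getD (s.drop j) k hk1 hkn
    simp only [List.getD] at hzk
    have hdpk := hdp (j + k) (by omega)
    simp only [List.getD] at hdpk
    rw [hzk, List.drop_drop, hdpk]

theorem loopA (s : List Char) : ∀ (m : Nat) (dp : List Nat),
    m ≤ s.length →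
    dp.length = s.length + 1 →
    (∀ j, m ≤ j → dp.getD j 0 = dpSpec s j) →
    ∀ j, (((List.range m).reverse).foldl (mdStepA s) dp).getD j 0 = dpSpec s j := by
  intro m
  induction m with
  | zero =>
    intro dp _ _ hdp j
    simpa using hdp j (Nat.zero_le j)
  | succ m ih =>
    intro dp hm hlen hdp j
    rw [List.range_succ, List.reverse_append, List.reverse_singleton, List.singleton_append,
      List.foldl_cons]
    exact ih (mdStepA s dp m) (by omega) (by unfold mdStepA; simp [hlen])
      (mdStepA_spec s dp m (by omega) hlen (fun j hj => hdp j hj)) j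

theorem drop_cons_getD (s : List Char) (m : Nat) (hm : m < s.length) :
    s.drop m = s.getD m ' ' :: s.drop (m + 1) := by
  rw [List.drop_eq_getElem_cons hm]
  congr 1
  simp [List.getD, List.getElem?_eq_getElem hm]

theorem lcpS_drop_rec (s : List Char) (m j : Nat) (hm : m < s.length) (hj : j < s.length) :
    lcpS (s.drop m) (s.drop j) =
      if s.getD m ' ' = s.getD j ' ' then lcpS (s.drop (m + 1)) (s.drop (j + 1)) + 1 else 0 := by
  rw [drop_cons_getD s m hm, drop_cons_getD s j hj]
  rfl

-- the freshly built row is the lcp row of suffix m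
theorem rowB_spec (s : List Char) (nxt : List Nat) (m : Nat) (hm : m < s.length)
    (hnxt : ∀ j, nxt.getD j 0 = lcpS (s.drop (m + 1)) (s.drop j)) :
    ∀ j, (((List.range s.length).map
        (fun j => if s.getD m ' ' = s.getD j ' ' then nxt.getD (j + 1) 0 + 1 else 0))
          ++ [0]).getD j 0 = lcpS (s.drop m) (s.drop j) := by
  intro j
  rcases Nat.lt_or_ge j s.length with hj | hj
  · rw [List.getD, List.getElem?_append_left (by simp [hj]), List.getElem?_map,
      List.getElem?_range hj]
    simp only [Option.map_some, Option.getD_some]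
    rw [lcpS_drop_rec s m j hm hj, hnxt (j + 1)]
  · rw [List.drop_eq_nil_of_le hj, lcpS_nil_right]
    rcases Nat.lt_or_ge j (s.length + 1) with h2 | h2
    · have hje : j = s.length := by omega
      subst hje
      rw [List.getD, List.getElem?_append_right (by simp)]
      simp
    · rw [List.getD, List.getElem?_eq_none (by simp; omega)]
      rfl

-- one dp step of B: the new row is correct and dp gains dpSpec at m
theorem mdStepB_spec (s : List Char) (nxt dp : List Nat) (m : Nat) (hm : m < s.length)
    (hlen : dp.length = s.length + 1)
    (hnxt : ∀ j, nxt.getD j 0 = lcpS (s.drop (m + 1)) (s.drop j))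
    (hdp : ∀ j, m + 1 ≤ j → dp.getD j 0 = dpSpec s j) :
    (∀ j, (mdStepB s (nxt, dp) m).1.getD j 0 = lcpS (s.drop m) (s.drop j)) ∧
    (∀ j, m ≤ j → (mdStepB s (nxt, dp) m).2.getD j 0 = dpSpec s j) := by
  constructor
  · exact rowB_spec s nxt m hm hnxt
  · intro j hj
    show (dp.set m _).getD j 0 = dpSpec s j
    rcases Nat.lt_or_ge m j with hji | hji
    · simp only [List.getD, List.getElem?_set_ne (by omega : m ≠ j)]
      exact hdp j hji
    · have hje : j = m := by omega
      subst hje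
      simp only [List.getD, List.getElem?_set_self (by omega : j < dp.length),
        Option.getD_some]
      rw [dpSpec_eq_fold s j hm]
      apply PySem.List.foldl_congr_mem
      intro best k hk
      obtain ⟨hk1, hk2⟩ := List.mem_range'_1.mp hk
      have hrow := rowB_spec s nxt j hm hnxt (j + k)
      simp only [List.getD] at hrow
      have hdpk := hdp (j + k) (by omega)
      simp only [List.getD] at hdpk
      rw [hrow, hdpk]

theorem loopB (s : List Char) : ∀ (m : Nat) (nxt dp : List Nat),
    m ≤ s.length →
    dp.length = s.length + 1 →
    (∀ j, nxt.getD j 0 = lcpS (s.drop m) (s.drop j)) →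
    (∀ j, m ≤ j → dp.getD j 0 = dpSpec s j) →
    ∀ j, ((((List.range m).reverse).foldl (mdStepB s) (nxt, dp)).2).getD j 0 = dpSpec s j := by
  intro m
  induction m with
  | zero =>
    intro nxt dp _ _ _ hdp j
    simpa using hdp j (Nat.zero_le j)
  | succ m ih =>
    intro nxt dp hm hlen hnxt hdp j
    rw [List.range_succ, List.reverse_append, List.reverse_singleton, List.singleton_append,
      List.foldl_cons]
    obtain ⟨hrow', hdp'⟩ := mdStepB_spec s nxt dp m (by omega) hlen hnxt hdp
    have heta : mdStepB s (nxt, dp) m = ((mdStepB s (nxt, dp) m).1, (mdStepB s (nxt, dp) m).2) := rfl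
    rw [heta]
    exact ih (mdStepB s (nxt, dp) m).1 (mdStepB s (nxt, dp) m).2 (by omega)
      (by show (dp.set m _).length = _; simp [hlen]) hrow' hdp' j

-- ===== VERDICT (by name: the statement is the Claim_ definition above) =====
theorem maximumDeletions_spec : Claim_equal_maximumDeletions := by
  intro s _
  unfold Spec_maximumDeletions maximumDeletions maximumDeletions_alt
  have hdp0 : ∀ j, s.toList.length ≤ j →
      (List.replicate (s.toList.length + 1) (0 : Nat)).getD j 0 = dpSpec s.toList j := by
    intro j hj
    rw [getD_repl, dpSpec, dif_neg (by omega)]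
  have hA := loopA s.toList s.toList.length (List.replicate (s.toList.length + 1) 0)
    le_rfl (by simp) hdp0
  have hB := loopB s.toList s.toList.length (List.replicate (s.toList.length + 1) 0)
    (List.replicate (s.toList.length + 1) 0)
    le_rfl (by simp)
    (fun j => by rw [getD_repl, List.drop_length, lcpS_nil_left]) hdp0
  simp only [hA 0, hB 0]
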